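-- pv_equiv track=rewrite | github.com/feliciatrinh/coding-challenges-and-review | arrays/n_unique_integers_sum_to_zero.py | array_zero
-- ===== SOURCE A (Python) =====
-- def array_zero(n):
--     if n % 2 != 0:
--         result = [0]
--         n -= 1
--     else:
--         result = []
--
--     start = 1
--     curr_sum = 0
--     for i in range(n):
--         if curr_sum <= 0:
--             result.append(start)
--             curr_sum += start
--         else:
--             result.append(-start)
--             curr_sum -= start
--             start += 1
--     return result
-- ===== SOURCE B (Python) =====
-- def array_zero(n):
--     pairs = n // 2 if n % 2 == 0 else (n - 1) // 2
--     result = [0] if n % 2 != 0 else []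
--     for k in range(1, pairs + 1):
--         result.append(k)
--         result.append(-k)
--     return result
-- ===== Notes on version B (the rewrite author's own statement) =====
-- stated objective: simpler
-- what changed: Replaces the running-sum accumulator and per-iteration sign branch with a direct construction: a loop over the pair count appending k and -k, halving the loop trips.
import Mathlib
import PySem

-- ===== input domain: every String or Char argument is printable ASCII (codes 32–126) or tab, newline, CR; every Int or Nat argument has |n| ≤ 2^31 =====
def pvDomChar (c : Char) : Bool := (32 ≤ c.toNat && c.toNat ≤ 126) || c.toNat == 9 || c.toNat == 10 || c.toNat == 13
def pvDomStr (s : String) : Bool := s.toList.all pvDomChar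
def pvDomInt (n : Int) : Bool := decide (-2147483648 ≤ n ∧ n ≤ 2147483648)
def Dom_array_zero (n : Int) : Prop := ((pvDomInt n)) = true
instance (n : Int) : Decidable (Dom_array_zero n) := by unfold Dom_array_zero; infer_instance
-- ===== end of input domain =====

-- B replaces A's running-sum accumulator and per-iteration sign branch with a direct
-- half-length loop appending the pair k, -k (simpler; same return value everywhere).

-- ===== PORT A =====
def array_zero (n : Int) : List Int :=
  -- if n % 2 != 0: result = [0]; n -= 1  else: result = []
  let init : List Int × Int :=
    if PySem.Int.mod n 2 ≠ 0 then ([0], n - 1) else ([], n)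
  -- start = 1; curr_sum = 0; for i in range(n): …
  let st :=
    (PySem.List.pyRange 0 init.2 1).foldl
      (fun (st : List Int × Int × Int) _ =>
        if st.2.2 ≤ 0 then
          (st.1 ++ [st.2.1], st.2.1, st.2.2 + st.2.1)
        else
          (st.1 ++ [-st.2.1], st.2.1 + 1, st.2.2 - st.2.1))
      (init.1, 1, 0)
  st.1

-- ===== PORT B =====
def array_zero_alt (n : Int) : List Int :=
  let pairs : Int :=
    if PySem.Int.mod n 2 = 0 then PySem.Int.floordiv n 2
    else PySem.Int.floordiv (n - 1) 2
  let result : List Int := if PySem.Int.mod n 2 ≠ 0 then [0] else []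
  (PySem.List.pyRange 1 (pairs + 1) 1).foldl (fun acc k => acc ++ [k, -k]) result

-- ===== PRECONDITION & SPEC =====
def Spec_array_zero (n : Int) (out : List Int) : Prop := out = array_zero_alt n
instance (n : Int) (out : List Int) : Decidable (Spec_array_zero n out) := by unfold Spec_array_zero; infer_instance

-- ===== CLAIM (what is proved, stated in full; the proofs are below) =====
def Claim_equal_array_zero : Prop := ∀ (n : Int), Dom_array_zero n → Spec_array_zero n (array_zero n)

-- ===== LEMMAS AND PROOFS =====

-- A's loop body (ignores the loop index)
def pvStepA (st : List Int × Int × Int) : List Int × Int × Int :=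
  if st.2.2 ≤ 0 then (st.1 ++ [st.2.1], st.2.1, st.2.2 + st.2.1)
  else (st.1 ++ [-st.2.1], st.2.1 + 1, st.2.2 - st.2.1)

theorem pvFoldl_const {α : Type} (l : List Int) (st : α) (f : α → α) :
    l.foldl (fun s _ => f s) st = f^[l.length] st := by
  induction l generalizing st with
  | nil => rfl
  | cons x xs ih => simp [List.foldl_cons, ih, Function.iterate_succ_apply]

theorem pvIterA (p : Nat) : ∀ (res : List Int) (s : Int), 1 ≤ s →
    pvStepA^[2 * p] (res, s, 0) =
      (res ++ (List.range p).flatMap (fun (i : Nat) => ([s + i, -(s + i)] : List Int)), s + p, 0) := by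
  induction p with
  | zero => intro res s _; simp
  | succ p ih =>
    intro res s hs
    have h2 : 2 * (p + 1) = 2 + 2 * p := by ring
    rw [h2, Function.iterate_add_apply, ih res s hs]
    have hstep : ∀ (r : List Int) (t : Int), 1 ≤ t →
        pvStepA^[2] (r, t, 0) = (r ++ [t, -t], t + 1, 0) := by
      intro r t ht
      show pvStepA (pvStepA (r, t, 0)) = _
      simp only [pvStepA]
      rw [if_pos (by omega : (0 : Int) ≤ 0)]
      simp only []
      rw [if_neg (by omega : ¬ (0 + t ≤ 0))]
      simp
    rw [hstep _ _ (by omega)]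
    refine Prod.ext ?_ (Prod.ext (by push_cast; ring) rfl)
    simp [List.range_succ, List.append_assoc]

theorem pvKey (m : Int) (res0 : List Int) (hm : m % 2 = 0) :
    ((PySem.List.pyRange 0 m 1).foldl
      (fun (st : List Int × Int × Int) _ =>
        if st.2.2 ≤ 0 then (st.1 ++ [st.2.1], st.2.1, st.2.2 + st.2.1)
        else (st.1 ++ [-st.2.1], st.2.1 + 1, st.2.2 - st.2.1)) (res0, 1, 0)).1
    = (PySem.List.pyRange 1 (m / 2 + 1) 1).foldl (fun acc k => acc ++ [k, -k]) res0 := by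
  show ((PySem.List.pyRange 0 m 1).foldl (fun s _ => pvStepA s) (res0, 1, 0)).1 = _
  rw [pvFoldl_const, PySem.List.length_pyRange_one]
  have h2 : (m - 0).toNat = 2 * (m / 2).toNat := by omega
  rw [h2, pvIterA _ res0 1 le_rfl]
  rw [PySem.List.pyRange_one, PySem.List.foldl_append_eq_flatMap]
  have h3 : (m / 2 + 1 - 1).toNat = (m / 2).toNat := by omega
  rw [h3]
  simp only [List.flatMap_map]

theorem array_zero_spec : Claim_equal_array_zero := by
  intro n _
  unfold Spec_array_zero array_zero array_zero_alt
  have hmod : PySem.Int.mod n 2 = n % 2 :=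
    PySem.Int.mod_eq_emod_of_pos (by norm_num)
  have hdiv : ∀ a : Int, PySem.Int.floordiv a 2 = a / 2 := fun a =>
    PySem.Int.floordiv_eq_ediv_of_pos (by norm_num)
  by_cases h : n % 2 = 0
  · simp only [hmod, hdiv, h, ne_eq, not_true_eq_false, if_false, if_true]
    exact pvKey n [] h
  · have h1 : n % 2 = 1 := by omega
    simp only [hmod, hdiv, h1, ne_eq, one_ne_zero, not_false_eq_true, if_true]
    exact pvKey (n - 1) [0] (by omega)
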